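-- pv_equiv track=rewrite | github.com/DavinHHiu/Code_Python | so_tang_giam_8.py | check
-- ===== SOURCE A (Python) =====
-- def check(s):
--     if len(s) != 8: return False
--     index = 0
--     for i in range(len(s) - 1):
--         if s[i] < s[i + 1]:
--             index = i
--             break
--         elif s[i] == s[i + 1]: return False
--     if index == 0: return False
--     for i in range(index, len(s) - 1):
--         if s[i] >= s[i + 1]: return False
--     return True
-- ===== SOURCE B (Python) =====
-- def check(s):
--     cs = list(s)
--     if len(cs) != 8:
--         return False
--     m = cs.index(min(cs))
--     if not 0 < m < 7:
--         return False
--     left, right = cs[:m + 1], cs[m:]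
--     return (sorted(left, reverse=True) == left and len(set(left)) == len(left)
--             and sorted(right) == right and len(set(right)) == len(right))
-- ===== Notes on version B (the rewrite author's own statement) =====
-- stated objective: alternative
-- what changed: B locates the valley as the index of the minimum character and verifies each arm globally with sorted() plus a set-cardinality distinctness check, instead of A's break-driven adjacent-comparison scans.
import Mathlib
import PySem

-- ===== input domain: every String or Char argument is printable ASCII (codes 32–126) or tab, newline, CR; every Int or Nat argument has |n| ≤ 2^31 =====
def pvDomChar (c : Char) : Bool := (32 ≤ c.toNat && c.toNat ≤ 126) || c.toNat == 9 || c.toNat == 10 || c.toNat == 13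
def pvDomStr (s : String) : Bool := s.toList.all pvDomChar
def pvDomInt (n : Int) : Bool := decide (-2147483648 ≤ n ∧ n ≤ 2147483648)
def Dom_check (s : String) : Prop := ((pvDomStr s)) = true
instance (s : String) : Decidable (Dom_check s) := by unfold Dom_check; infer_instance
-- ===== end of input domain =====

-- B finds the valley as the index of the minimum character and validates each arm globally
-- with sorted() plus a set-cardinality distinctness test, instead of A's break-driven
-- adjacent-comparison scans (objective: alternative algorithm, same cost).

-- ===== PORT A =====
-- first loop of A: scan for the first i with s[i] < s[i+1] (break → some i);
-- an equal adjacent pair before that returns False (none); loop completing leaves index = 0.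
def checkLoop1 : List Char → Nat → Option Nat
  | c1 :: c2 :: rest, i =>
      if c1 < c2 then some i
      else if c1 = c2 then none
      else checkLoop1 (c2 :: rest) (i + 1)
  | _, _ => some 0

-- second loop of A: from index on, any s[i] >= s[i+1] returns False
def checkLoop2 : List Char → Bool
  | c1 :: c2 :: rest =>
      if c2 ≤ c1 then false else checkLoop2 (c2 :: rest)
  | _ => true

def check (s : String) : Bool :=
  let cs := s.toList
  if cs.length ≠ 8 then false
  else
    match checkLoop1 cs 0 with
    | none => false
    | some index =>
      if index = 0 then false
      else checkLoop2 (cs.drop index)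

-- ===== PORT B =====
def check_alt (s : String) : Bool :=
  let cs := s.toList
  if cs.length ≠ 8 then false
  else
    match PySem.List.min? cs (fun x => x) with
    | none => false            -- unreachable: min(cs) only raises on the empty list, length is 8
    | some mn =>
      match PySem.List.index? cs mn with
      | none => false          -- unreachable: the minimum is a member
      | some m =>
        if !(decide (0 < m) && decide (m < 7)) then false
        else
          let left := PySem.List.slice cs none (some ((m : Int) + 1))   -- cs[:m+1]
          let right := PySem.List.slice cs (some (m : Int)) none        -- cs[m:]
          (PySem.List.sorted left (fun x => x) true == left)
            && ((PySem.Set.ofList left).length == left.length)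
            && (PySem.List.sorted right (fun x => x) false == right)
            && ((PySem.Set.ofList right).length == right.length)

-- ===== PRECONDITION & SPEC =====
def Spec_check (s : String) (out : Bool) : Prop := out = check_alt s
instance (s : String) (out : Bool) : Decidable (Spec_check s out) := by unfold Spec_check; infer_instance

-- ===== CLAIM (what is proved, stated in full; the proofs are below) =====
def Claim_equal_check : Prop := ∀ (s : String), Dom_check s → Spec_check s (check s)

-- ===== LEMMAS AND PROOFS =====

-- the common mathematical shape: strict decrease up to m, strict increase from m
def pvValley (cs : List Char) (m : Nat) : Prop :=
  1 ≤ m ∧ m ≤ 6 ∧ List.Pairwise (· > ·) (cs.take (m + 1)) ∧ List.Pairwise (· < ·) (cs.drop m)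

-- len(set(l)) == len(l) means l has no duplicates
theorem pv_nodup_of_ofList_length (l : List Char)
    (h : (PySem.Set.ofList l).length = l.length) : l.Nodup := by
  induction l with
  | nil => simp
  | cons x xs ih =>
    rw [PySem.Set.ofList_cons] at h
    simp only [List.length_cons, Nat.add_right_cancel_iff] at h
    have hle2 : (PySem.Set.ofList xs).length ≤ xs.length := PySem.Set.length_ofList_le xs
    have hsub : (PySem.Set.discard (PySem.Set.ofList xs) x).Sublist (PySem.Set.ofList xs) :=
      List.filter_sublist
    have hfle := hsub.length_le
    have heq : PySem.Set.discard (PySem.Set.ofList xs) x = PySem.Set.ofList xs :=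
      hsub.eq_of_length (by omega)
    have hxnot : x ∉ xs := by
      intro hx
      have h1 : x ∈ PySem.Set.ofList xs := (PySem.Set.mem_ofList xs x).mpr hx
      have h2 : x ∉ PySem.Set.discard (PySem.Set.ofList xs) x := by
        intro hc; exact ((PySem.Set.mem_discard _ x x).mp hc).2 rfl
      rw [heq] at h2; exact h2 h1
    exact List.Nodup.cons hxnot (ih (by omega))

-- B's arm test (reverse=True side): sorted desc equals l and all-distinct ↔ strictly decreasing
theorem pv_arm_dec (l : List Char) :
    ((PySem.List.sorted l (fun x => x) true == l)
      && ((PySem.Set.ofList l).length == l.length)) = true ↔ List.Pairwise (· > ·) l := by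
  simp only [Bool.and_eq_true, beq_iff_eq]
  constructor
  · rintro ⟨hs, hn⟩
    have hpw : List.Pairwise (fun a b : Char => b ≤ a) l := by
      have := PySem.List.sorted_pairwise_rev l (fun x => x); rwa [hs] at this
    have hnd : l.Nodup := pv_nodup_of_ofList_length l hn
    exact (hpw.and hnd).imp (fun {a b} hab => lt_of_le_of_ne hab.1 (Ne.symm hab.2))
  · intro hp
    have hnd : l.Nodup := hp.imp (fun {a b} hab => ne_of_gt hab)
    exact ⟨PySem.List.sorted_rev_eq_self_of_pairwise l _ (hp.imp (fun {a b} hab => le_of_lt hab)),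
      by rw [PySem.Set.ofList_eq_self_of_nodup l hnd]⟩

-- B's arm test (ascending side)
theorem pv_arm_inc (l : List Char) :
    ((PySem.List.sorted l (fun x => x) false == l)
      && ((PySem.Set.ofList l).length == l.length)) = true ↔ List.Pairwise (· < ·) l := by
  simp only [Bool.and_eq_true, beq_iff_eq]
  constructor
  · rintro ⟨hs, hn⟩
    have hpw : List.Pairwise (fun a b : Char => a ≤ b) l := by
      have := PySem.List.sorted_pairwise l (fun x => x); rwa [hs] at this
    have hnd : l.Nodup := pv_nodup_of_ofList_length l hn
    exact (hpw.and hnd).imp (fun {a b} hab => lt_of_le_of_ne hab.1 hab.2)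
  · intro hp
    have hnd : l.Nodup := hp.imp (fun {a b} hab => ne_of_lt hab)
    exact ⟨PySem.List.sorted_eq_self_of_pairwise l _ (hp.imp (fun {a b} hab => le_of_lt hab)),
      by rw [PySem.Set.ofList_eq_self_of_nodup l hnd]⟩

-- A's second loop is exactly strict increase
theorem pv_loop2_iff (l : List Char) : checkLoop2 l = true ↔ List.Pairwise (· < ·) l := by
  induction l with
  | nil => simp [checkLoop2]
  | cons a t ih =>
    cases t with
    | nil => simp [checkLoop2]
    | cons b rest =>
      by_cases hle : b ≤ a
      · simp only [checkLoop2, if_pos hle]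
        constructor
        · intro h; exact absurd h (by simp)
        · intro h
          exact absurd (List.rel_of_pairwise_cons h (List.mem_cons_self ..)) (not_lt.mpr hle)
      · have hlt : a < b := not_le.mp hle
        rw [show checkLoop2 (a :: b :: rest) = checkLoop2 (b :: rest) by simp [checkLoop2, hle],
          ih, ← List.isChain_iff_pairwise (l := a :: b :: rest), List.isChain_cons_cons,
          ← List.isChain_iff_pairwise (l := b :: rest)]
        exact ⟨fun h => ⟨hlt, h⟩, fun h => h.2⟩

-- A's first loop, soundness: a nonzero result is i + (break position), with strict decrease
-- up to the break and an ascent there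
theorem pv_loop1_sound (l : List Char) (i m : Nat) (h : checkLoop1 l i = some m) :
    m = 0 ∨ ∃ k, m = i + k ∧ ∃ hk : k + 1 < l.length,
      List.Pairwise (· > ·) (l.take (k + 1)) ∧ l[k] < l[k + 1] := by
  induction l generalizing i with
  | nil => left; simpa [checkLoop1] using h.symm
  | cons a t ih =>
    cases t with
    | nil => left; simpa [checkLoop1] using h.symm
    | cons b rest =>
      by_cases hab : a < b
      · right
        refine ⟨0, by simpa [checkLoop1, hab] using h.symm, by simp, by simp, by simpa⟩
      · by_cases heq : a = b
        · exact absurd h (by simp [checkLoop1, heq])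
        · have hba : b < a := by
            rcases lt_trichotomy a b with h' | h' | h'
            · exact absurd h' hab
            · exact absurd h' heq
            · exact h'
          have h' : checkLoop1 (b :: rest) (i + 1) = some m := by
            rw [← h]
            show checkLoop1 (b :: rest) (i + 1) =
              (if a < b then some i else if a = b then none else checkLoop1 (b :: rest) (i + 1))
            rw [if_neg hab, if_neg heq]
          rcases ih (i + 1) h' with h0 | ⟨k, hm, hk, hpw, hlt⟩
          · exact Or.inl h0
          · right
            refine ⟨k + 1, by omega, by simpa using Nat.succ_lt_succ hk, ?_, by simpa using hlt⟩
            rw [List.take_succ_cons, ← List.isChain_iff_pairwise]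
            rw [← List.isChain_iff_pairwise] at hpw
            cases hts : (b :: rest).take (k + 1) with
            | nil => simp at hts
            | cons y ys =>
              have hyb : y = b := by
                have : ((b :: rest).take (k + 1)).head? = some y := by rw [hts]; rfl
                exact ((by simpa [List.take_succ_cons] using this : b = y)).symm
              rw [List.isChain_cons_cons]
              exact ⟨hyb ▸ hba, hts ▸ hpw⟩

-- A's first loop, completeness: a strict decrease up to k followed by an ascent makes it break at k
theorem pv_loop1_complete (k : Nat) : ∀ (l : List Char) (i : Nat) (hk : k + 1 < l.length),
    List.Pairwise (· > ·) (l.take (k + 1)) → l[k] < l[k + 1] → checkLoop1 l i = some (i + k) := by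
  induction k with
  | zero =>
    intro l i hk hpw hlt
    match l with
    | a :: b :: rest =>
      have : a < b := by simpa using hlt
      simp [checkLoop1, this]
  | succ k ih =>
    intro l i hk hpw hlt
    match l with
    | a :: b :: rest =>
      have hk' : k + 1 < (b :: rest).length := by
        simp only [List.length_cons] at hk ⊢; omega
      have hab : a > b := by
        rw [List.take_succ_cons, ← List.isChain_iff_pairwise] at hpw
        rw [List.take_succ_cons] at hpw
        exact (List.isChain_cons_cons.mp hpw).1
      have hrec := ih (b :: rest) (i + 1) hk'
        (by rw [List.take_succ_cons, ← List.isChain_iff_pairwise] at hpw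
            rw [List.take_succ_cons] at hpw
            rw [← List.isChain_iff_pairwise]
            exact (List.isChain_cons_cons.mp hpw).2)
        (by simpa using hlt)
      have : checkLoop1 (a :: b :: rest) i = checkLoop1 (b :: rest) (i + 1) := by
        simp [checkLoop1, not_lt_of_gt hab, ne_of_gt hab]
      rw [this, hrec]
      congr 1; omega

-- inside a valley at m, cs[m] is the unique strict minimum
theorem pv_valley_min (cs : List Char) (hlen : cs.length = 8) (m : Nat) (hm : m < 8)
    (hv : pvValley cs m) :
    ∀ j (hj : j < 8), j ≠ m → cs[m]'(by omega) < cs[j]'(by omega) := by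
  obtain ⟨h1, h6, hdec, hinc⟩ := hv
  intro j hj hjm
  rcases lt_or_gt_of_ne hjm with hlt | hgt
  · -- j < m : positions j and m of cs.take (m+1)
    have hL : (cs.take (m + 1)).length = m + 1 := by rw [List.length_take]; omega
    have := (List.pairwise_iff_getElem.mp hdec) j m (by omega) (by omega) (by omega)
    simpa using this
  · -- m < j : positions 0 and j - m of cs.drop m
    have hL : (cs.drop m).length = 8 - m := by rw [List.length_drop]; omega
    have := (List.pairwise_iff_getElem.mp hinc) 0 (j - m) (by omega) (by omega) (by omega)
    have e1 : (cs.drop m)[0]'(by omega) = cs[m]'(by omega) := by simp [List.getElem_drop]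
    have e2 : (cs.drop m)[j - m]'(by omega) = cs[j]'(by omega) := by
      rw [List.getElem_drop]; congr 1; omega
    rwa [e1, e2] at this
  
-- with a valley at v, B's min/index pipeline lands exactly on v
theorem pv_index_min (cs : List Char) (hlen : cs.length = 8) (mn : Char) (v : Nat)
    (hv : pvValley cs v) (hmn : PySem.List.min? cs (fun x => x) = some mn) :
    PySem.List.index? cs mn = some v := by
  have hv6 : v ≤ 6 := hv.2.1
  have hv8 : v < 8 := by omega
  have huniq := pv_valley_min cs hlen v (by omega) hv
  have hmem : mn ∈ cs := PySem.List.min?_mem hmn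
  have hmin : ∀ y ∈ cs, mn ≤ y := PySem.List.min?_isMin hmn
  have hmn_eq : mn = cs[v]'(by omega) := by
    obtain ⟨j, hj, hje⟩ := List.mem_iff_getElem.mp hmem
    by_cases hjv : j = v
    · rw [← hje]; subst hjv; rfl
    · exfalso
      have h1 : cs[v]'(by omega) < cs[j] := huniq j (by omega) hjv
      have h2 : mn ≤ cs[v]'(by omega) := hmin _ (List.getElem_mem (by omega))
      rw [hje] at h1; exact absurd (lt_of_le_of_lt h2 h1) (lt_irrefl mn)
  rw [PySem.List.index?_eq_some_iff]
  refine ⟨cs.take v, cs.drop (v + 1), ?_, by rw [List.length_take]; omega, ?_⟩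
  · rw [hmn_eq, ← List.drop_eq_getElem_cons (by omega), List.take_append_drop]
  · intro hmem'
    obtain ⟨j, hj, hje⟩ := List.mem_iff_getElem.mp hmem'
    have hjlen : j < v := by
      have := hj; rw [List.length_take] at this; omega
    have hje' : cs[j]'(by omega) = mn := by
      rw [← hje]; simp [List.getElem_take]
    have := huniq j (by omega) (by omega)
    rw [hje', hmn_eq] at this
    exact absurd this (lt_irrefl _)

-- A accepts exactly the valleys
theorem pv_A_iff (s : String) (hlen : s.toList.length = 8) :
    check s = true ↔ ∃ m, pvValley s.toList m := by
  set cs := s.toList with hcs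
  unfold check
  rw [← hcs]
  simp only [hlen, ne_eq, not_true_eq_false]
  rw [if_neg not_false]
  have hcomp : ∀ m, pvValley cs m → checkLoop1 cs 0 = some m := by
    intro m ⟨h1, h6, hdec, hinc⟩
    have hL : (cs.drop m).length = 8 - m := by rw [List.length_drop]; omega
    have hasc : cs[m]'(by omega) < cs[m + 1]'(by omega) := by
      have := (List.pairwise_iff_getElem.mp hinc) 0 1 (by omega) (by omega) (by omega)
      have e1 : (cs.drop m)[0]'(by omega) = cs[m]'(by omega) := by simp [List.getElem_drop]
      have e2 : (cs.drop m)[1]'(by omega) = cs[m + 1]'(by omega) := by simp [List.getElem_drop]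
      rwa [e1, e2] at this
    simpa using pv_loop1_complete m cs 0 (by omega) hdec hasc
  cases h1 : checkLoop1 cs 0 with
  | none =>
    change false = true ↔ _
    simp only [Bool.false_eq_true, false_iff]
    rintro ⟨m, hv⟩
    rw [hcomp m hv] at h1; cases h1
  | some idx =>
    change (if idx = 0 then false else checkLoop2 (List.drop idx cs)) = true ↔ _
    by_cases hidx : idx = 0
    · rw [if_pos hidx]
      simp only [Bool.false_eq_true, false_iff]
      rintro ⟨m, hv⟩
      have := hcomp m hv; rw [h1] at this
      have hm0 : m = 0 := by injection this with h; omega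
      have h1m := hv.1
      omega
    · simp only [if_neg hidx]
      constructor
      · intro h2
        rcases pv_loop1_sound cs 0 idx h1 with h0 | ⟨k, hk0, hk, hdec, hasc⟩
        · exact absurd h0 hidx
        · have hki : idx = k := by omega
          subst hki
          exact ⟨idx, by omega, by omega, hdec, (pv_loop2_iff _).mp h2⟩
      · rintro ⟨m, hv⟩
        have := hcomp m hv; rw [h1] at this
        have hmi : m = idx := by injection this with h; omega
        subst hmi
        exact (pv_loop2_iff _).mpr hv.2.2.2

-- B accepts exactly the valleys
theorem pv_B_iff (s : String) (hlen : s.toList.length = 8) :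
    check_alt s = true ↔ ∃ m, pvValley s.toList m := by
  set cs := s.toList with hcs
  unfold check_alt
  rw [← hcs]
  simp only [hlen, ne_eq, not_true_eq_false]
  rw [if_neg not_false]
  obtain ⟨mn, hmn⟩ : ∃ mn, PySem.List.min? cs (fun x => x) = some mn := by
    cases h : PySem.List.min? cs (fun x => x) with
    | none =>
      have : cs = [] := (PySem.List.min?_eq_none_iff cs _).mp h
      rw [this] at hlen; cases hlen
    | some mn => exact ⟨mn, rfl⟩
  obtain ⟨m, hidx⟩ : ∃ m, PySem.List.index? cs mn = some m := by
    cases h : PySem.List.index? cs mn with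
    | none =>
      exact absurd (PySem.List.min?_mem hmn) ((PySem.List.index?_eq_none_iff cs mn).mp h)
    | some m => exact ⟨m, rfl⟩
  simp only [hmn, hidx]
  have hslice_l : PySem.List.slice cs none (some ((m : Int) + 1)) = cs.take (m + 1) := by
    have : ((m : Int) + 1) = ((m + 1 : Nat) : Int) := by push_cast; ring
    rw [this, PySem.List.slice_to_natCast]
  have hslice_r : PySem.List.slice cs (some (m : Int)) none = cs.drop m :=
    PySem.List.slice_from_natCast cs m
  by_cases hg : 0 < m ∧ m < 7
  · rw [if_neg (by simp [hg.1, hg.2])]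
    simp only [hslice_l, hslice_r]
    constructor
    · intro h
      simp only [Bool.and_eq_true] at h
      obtain ⟨⟨⟨hd1, hd2⟩, hi1⟩, hi2⟩ := h
      exact ⟨m, by omega, by omega,
        (pv_arm_dec _).mp (by simp only [Bool.and_eq_true]; exact ⟨hd1, hd2⟩),
        (pv_arm_inc _).mp (by simp only [Bool.and_eq_true]; exact ⟨hi1, hi2⟩)⟩
    · rintro ⟨v, hv⟩
      have := pv_index_min cs hlen mn v hv hmn
      rw [hidx] at this
      have hmv : m = v := Option.some.inj this
      subst hmv
      have hd := (pv_arm_dec (cs.take (m + 1))).mpr hv.2.2.1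
      have hi := (pv_arm_inc (cs.drop m)).mpr hv.2.2.2
      simp only [Bool.and_eq_true] at hd hi ⊢
      exact ⟨⟨hd, hi.1⟩, hi.2⟩
  · rw [if_pos (by simp only [Bool.not_and, Bool.or_eq_true, Bool.not_eq_eq_eq_not, Bool.not_true, decide_eq_false_iff_not, not_lt]; omega)]
    simp only [Bool.false_eq_true, false_iff]
    rintro ⟨v, hv⟩
    have := pv_index_min cs hlen mn v hv hmn
    rw [hidx] at this
    have hmv : m = v := Option.some.inj this
    have h1v := hv.1
    have h6v := hv.2.1
    exact hg ⟨by omega, by omega⟩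

-- ===== VERDICT (by name: the statement is the Claim_ definition above) =====
theorem check_spec : Claim_equal_check := by
  intro s _
  unfold Spec_check
  by_cases hlen : s.toList.length = 8
  · rw [Bool.eq_iff_iff, pv_A_iff s hlen, pv_B_iff s hlen]
  · have h8 : s.toList.length ≠ 8 := hlen
    unfold check check_alt
    simp only [if_pos h8]
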